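-- pv_equiv track=rewrite | github.com/httk/httk | src/httk/core/basic.py | parse_parexpr
-- ===== SOURCE A (Python) =====
-- def parse_parexpr(string):
--     """Generate parenthesized contents in string as pairs (level, contents)."""
--     stack = []
--     for i, c in enumerate(string):
--         if c == '(':
--             stack.append(i)
--         elif c == ')' and stack:
--             start = stack.pop()
--             yield (len(stack), string[start + 1: i])
-- ===== SOURCE B (Python) =====
-- def parse_parexpr(string):
--     """Generate parenthesized contents in string as pairs (level, contents)."""
--     def parse(i, level):
--         # parse the body of a group at nesting depth `level`, starting at index i;
--         # returns (closed, j): whether a matching ')' was found, and its index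
--         # (or the index where scanning stopped).
--         while i < len(string):
--             c = string[i]
--             if c == '(':
--                 closed, j = yield from parse(i + 1, level + 1)
--                 if closed:
--                     yield (level, string[i + 1:j])
--                     i = j + 1
--                 else:
--                     return (False, j)
--             elif c == ')' and level > 0:
--                 return (True, i)
--             else:
--                 i += 1
--         return (False, i)
--     return (yield from parse(0, 0))
-- ===== Notes on version B (the rewrite author's own statement) =====
-- stated objective: alternative
-- what changed: Replaced A's single flat loop over an explicit stack of open-parenthesis positions with a recursive-descent parser (one recursive frame per nesting level) that returns each group's closing index and yields on the way back up.
import Mathlib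
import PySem

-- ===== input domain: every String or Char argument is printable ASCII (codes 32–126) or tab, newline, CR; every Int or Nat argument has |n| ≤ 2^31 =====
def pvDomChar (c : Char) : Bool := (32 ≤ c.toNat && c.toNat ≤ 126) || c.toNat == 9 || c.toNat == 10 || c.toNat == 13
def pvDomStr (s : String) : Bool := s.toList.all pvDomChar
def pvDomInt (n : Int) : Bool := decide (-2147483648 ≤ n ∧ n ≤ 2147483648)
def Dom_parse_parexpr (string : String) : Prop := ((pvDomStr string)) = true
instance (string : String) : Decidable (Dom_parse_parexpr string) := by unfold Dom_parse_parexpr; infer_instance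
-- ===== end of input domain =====

-- B replaces A's flat loop over an explicit stack of open-paren positions by a recursive-descent
-- parser (one frame per nesting level); objective: alternative decomposition, same cost.

-- ===== PORT A =====
-- A's loop: an open paren pushes its index; a close paren with nonempty stack pops and
-- yields (len(stack), string[start+1:i]).  stack top = head of the list.
def parse_parexpr_loop (s : String) : List (Char × Nat) → List Nat → List (Int × String) → List (Int × String)
  | [], _, out => out
  | (c, i) :: rest, stack, out =>
    if c = '(' then parse_parexpr_loop s rest (i :: stack) out
    else
      match stack with
      | start :: st' =>
        if c = ')' then
          parse_parexpr_loop s rest st'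
            (out ++ [((st'.length : Int), PySem.Str.slice s (some ((start : Int) + 1)) (some (i : Int)))])
        else parse_parexpr_loop s rest stack out
      | [] => parse_parexpr_loop s rest stack out

def parse_parexpr (string : String) : List (Int × String) :=
  parse_parexpr_loop string string.toList.zipIdx [] []

-- ===== PORT B =====
-- B's recursive descent: parse the body of a group at depth `level` from index i; returns
-- (closed?, stop index, yields).  The subtype records i ≤ stop, needed for termination.
def parse_parexpr_descend (s : String) (l : List Char) (i level : Nat) :
    {r : Bool × Nat × List (Int × String) // i ≤ r.2.1} :=
  if h : i < l.length then
    let c := l[i]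
    if c = '(' then
      match parse_parexpr_descend s l (i + 1) (level + 1) with
      | ⟨(true, j, outs1), hj⟩ =>
        match parse_parexpr_descend s l (j + 1) level with
        | ⟨(cl2, j2, outs2), hj2⟩ =>
          ⟨(cl2, j2, outs1 ++ ((level : Int), PySem.Str.slice s (some ((i : Int) + 1)) (some (j : Int))) :: outs2),
            by (try dsimp only at *); omega⟩
      | ⟨(false, j, outs1), hj⟩ => ⟨(false, j, outs1), by (try dsimp only at *); omega⟩
    else if c = ')' ∧ 0 < level then ⟨(true, i, []), Nat.le_refl i⟩
    else
      match parse_parexpr_descend s l (i + 1) level with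
      | ⟨r, hr⟩ => ⟨r, by omega⟩
  else ⟨(false, i, []), Nat.le_refl i⟩
termination_by l.length - i
decreasing_by all_goals (try dsimp only at *); omega

def parse_parexpr_alt (string : String) : List (Int × String) :=
  (parse_parexpr_descend string string.toList 0 0).val.2.2

-- ===== PRECONDITION & SPEC =====
def Spec_parse_parexpr (string : String) (out : List (Int × String)) : Prop := out = parse_parexpr_alt string
instance (string : String) (out : List (Int × String)) : Decidable (Spec_parse_parexpr string out) := by unfold Spec_parse_parexpr; infer_instance

-- ===== CLAIM (what is proved, stated in full; the proofs are below) =====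
def Claim_equal_parse_parexpr : Prop := ∀ (string : String), Dom_parse_parexpr string → Spec_parse_parexpr string (parse_parexpr string)

-- ===== LEMMAS AND PROOFS =====

-- The continuation of A's loop from index i with pending stack equals the chain of
-- suspended recursive-descent frames of B.
lemma parse_parexpr_main (s : String) (l : List Char) :
    ∀ (n i : Nat) (stack : List Nat) (out : List (Int × String)), l.length - i ≤ n →
    parse_parexpr_loop s ((l.drop i).zipIdx i) stack out =
      match stack, (parse_parexpr_descend s l i stack.length).val with
      | start :: st', (true, j, outs) =>
          parse_parexpr_loop s ((l.drop (j + 1)).zipIdx (j + 1)) st'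
            (out ++ outs ++ [((st'.length : Int), PySem.Str.slice s (some ((start : Int) + 1)) (some (j : Int)))])
      | _, (_, _, outs) => out ++ outs := by
  intro n
  induction n with
  | zero =>
    intro i stack out hn
    have hi : l.length ≤ i := by omega
    rw [List.drop_eq_nil_of_le hi, parse_parexpr_descend]
    simp only [List.zipIdx_nil, parse_parexpr_loop, dif_neg (by omega : ¬ i < l.length)]
    cases stack <;> simp
  | succ n ih =>
    intro i stack out hn
    by_cases hi : i < l.length
    · rw [List.drop_eq_getElem_cons hi, List.zipIdx_cons, parse_parexpr_descend]
      simp only [dif_pos hi]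
      by_cases hpo : l[i] = '('
      · -- '(' : A pushes i, B opens a child frame
        rw [if_pos hpo]
        simp only [parse_parexpr_loop, if_pos hpo]
        rcases h1 : parse_parexpr_descend s l (i + 1) (stack.length + 1) with ⟨⟨cl1, j, outs1⟩, hj1⟩
        have ih1 := ih (i + 1) (i :: stack) out (by omega)
        simp only [List.length_cons] at ih1
        rw [h1] at ih1
        cases cl1
        · -- child frame never closed: everything after '(' yields outs1 and stops
          simpa using ih1
        · -- child closed at j; continue A's loop from j+1 with the old stack
          simp only [h1]
          rcases h2 : parse_parexpr_descend s l (j + 1) stack.length with ⟨⟨cl2, j2, outs2⟩, hj2⟩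
          have ih2 := ih (j + 1) stack
            (out ++ outs1 ++ [((stack.length : Int), PySem.Str.slice s (some ((i : Int) + 1)) (some (j : Int)))])
            (by simp only at hj1; omega)
          rw [h2] at ih2
          simp only at ih1
          rw [ih1, ih2]
          cases stack with
          | nil => simp
          | cons start st' => cases cl2 <;> simp
      · -- not '('
        rw [if_neg hpo]
        cases stack with
        | nil =>
          -- empty stack: A skips the character (')' included), B is at level 0
          simp only [List.length_nil]
          have hnc : ¬ (l[i] = ')' ∧ 0 < 0) := by simp
          rw [if_neg hnc]
          simp only [parse_parexpr_loop, if_neg hpo]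
          rcases h1 : parse_parexpr_descend s l (i + 1) 0 with ⟨⟨cl1, j, outs1⟩, hj1⟩
          have ih1 := ih (i + 1) [] out (by omega)
          simp only [List.length_nil] at ih1
          rw [h1] at ih1
          simpa using ih1
        | cons start st' =>
          by_cases hpc : l[i] = ')'
          · -- ')' with nonempty stack: A pops and yields; B closes the current frame
            rw [if_pos (by simp [hpc] : l[i] = ')' ∧ 0 < (start :: st').length)]
            simp only [parse_parexpr_loop, if_neg hpo, if_pos hpc]
            simp
          · -- ordinary character: both sides skip it
            rw [if_neg (by simp [hpc])]
            simp only [parse_parexpr_loop, if_neg hpo, if_neg hpc]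
            rcases h1 : parse_parexpr_descend s l (i + 1) (start :: st').length with ⟨⟨cl1, j, outs1⟩, hj1⟩
            have ih1 := ih (i + 1) (start :: st') out (by omega)
            rw [h1] at ih1
            simpa using ih1
    · have hle : l.length ≤ i := by omega
      rw [List.drop_eq_nil_of_le hle, parse_parexpr_descend]
      simp only [List.zipIdx_nil, parse_parexpr_loop, dif_neg hi]
      cases stack <;> simp

-- ===== VERDICT (by name: the statement is the Claim_ definition above) =====
theorem parse_parexpr_spec : Claim_equal_parse_parexpr := by
  intro string _
  unfold Spec_parse_parexpr parse_parexpr parse_parexpr_alt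
  have h := parse_parexpr_main string string.toList string.toList.length 0 [] [] (by omega)
  simpa using h
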